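-- pv_equiv track=rewrite | github.com/Toddoward/Programmers | 프로그래머스/0/181880. 1로 만들기/1로 만들기.py | solution
-- ===== SOURCE A (Python) =====
-- def solution(num_list):
--     answer = 0
--     while True:
--         if len(num_list) == num_list.count(1):
--             break
--         for i in range(0, len(num_list)):
--             if num_list[i] != 1:
--                 num_list[i] = num_list[i] // 2
--                 answer += 1
--     return answer
-- ===== SOURCE B (Python) =====
-- def solution(num_list):
--     return sum(n.bit_length() - 1 for n in num_list)
-- ===== Notes on version B (the rewrite author's own statement) =====
-- stated objective: simpler
-- what changed: Replaces the repeated halve-until-all-ones passes (re-counting 1s each round and mutating the list) by a closed form: each element n>=1 needs exactly n.bit_length()-1 halvings, summed in one pass; unlike A, B does not mutate num_list.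
import Mathlib
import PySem

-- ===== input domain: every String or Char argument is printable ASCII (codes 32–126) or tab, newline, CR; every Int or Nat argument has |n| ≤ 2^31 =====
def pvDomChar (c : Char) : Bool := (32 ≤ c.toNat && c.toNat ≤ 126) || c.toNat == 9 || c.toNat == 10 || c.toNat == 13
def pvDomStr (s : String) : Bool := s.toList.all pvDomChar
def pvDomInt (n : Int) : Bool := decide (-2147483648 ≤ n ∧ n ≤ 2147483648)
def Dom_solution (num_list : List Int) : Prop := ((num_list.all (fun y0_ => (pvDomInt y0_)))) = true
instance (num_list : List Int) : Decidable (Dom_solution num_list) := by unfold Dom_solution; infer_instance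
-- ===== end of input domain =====

-- B replaces A's repeated halving passes by the closed-form one-pass sum Σ (bit_length n − 1) (simpler).
-- A mutates num_list in place (halving its entries); B does not: the equivalence proved is about the return value only.

-- ===== PORT A =====
-- one inner 'for i in range(len)' pass: halves each non-1 entry, counts how often answer was incremented
def solutionPass : List Int → List Int × Int
  | [] => ([], 0)
  | x :: xs =>
    let p := solutionPass xs
    if x ≠ 1 then (PySem.Int.floordiv x 2 :: p.1, p.2 + 1) else (x :: p.1, p.2)

-- the 'while True' loop; the fuel only makes the recursion total (Pre_ inputs finish well within it)
def solutionLoop : Nat → List Int → Int → Int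
  | 0, _, answer => answer
  | fuel+1, l, answer =>
    if l.count 1 = l.length then answer
    else
      let p := solutionPass l
      solutionLoop fuel p.1 (answer + p.2)

def solution (num_list : List Int) : Int := solutionLoop 64 num_list 0

-- ===== PORT B =====
def solution_alt (num_list : List Int) : Int :=
  (num_list.map (fun n => (PySem.Int.bitLength n : Int) - 1)).sum

-- ===== PRECONDITION & SPEC =====
-- Pre_ excludes lists containing an element ≤ 0: on those A's while-loop never terminates (0 and
-- negatives never reach 1 under floor halving), so A returns on exactly the inputs Pre_ admits.
def Pre_solution (num_list : List Int) : Prop := ∀ x ∈ num_list, 1 ≤ x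
instance (num_list : List Int) : Decidable (Pre_solution num_list) := by unfold Pre_solution; infer_instance
def pvWitness_solution : List Int := [5, 1, 12]

def Spec_solution (num_list : List Int) (out : Int) : Prop := out = solution_alt num_list
instance (num_list : List Int) (out : Int) : Decidable (Spec_solution num_list out) := by unfold Spec_solution; infer_instance

-- ===== CLAIM (what is proved, stated in full; the proofs are below) =====
def Claim_equal_solution : Prop := ∀ (num_list : List Int), Dom_solution num_list → Pre_solution num_list → Spec_solution num_list (solution num_list)

-- ===== LEMMAS AND PROOFS =====

-- x ≥ 2 : the half is ≥ 1 and its bitLength is one smaller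
lemma pvHalfPos {x : Int} (hx : 2 ≤ x) : 1 ≤ PySem.Int.floordiv x 2 := by
  rw [PySem.Int.floordiv_eq_ediv_of_pos (by omega)]; omega

lemma pvBitLenHalf {x : Int} (hx : 2 ≤ x) :
    PySem.Int.bitLength (PySem.Int.floordiv x 2) = PySem.Int.bitLength x - 1 := by
  have := PySem.Int.bitLength_of_pos (n := x) (by omega)
  omega

-- bitLength x ≤ 1 and 1 ≤ x force x = 1
lemma eq_one_of_bitLength_le_one {x : Int} (hx : 1 ≤ x) (hb : PySem.Int.bitLength x ≤ 1) : x = 1 := by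
  by_contra hne
  have h2 : 2 ≤ x := by omega
  have hrec := PySem.Int.bitLength_of_pos (n := x) (by omega)
  have hhalf : 1 ≤ PySem.Int.floordiv x 2 := pvHalfPos h2
  have hrec2 := PySem.Int.bitLength_of_pos (n := PySem.Int.floordiv x 2) (by omega)
  omega

lemma pvBitLenOne : PySem.Int.bitLength 1 = 1 := by decide

-- the pass preserves positivity and drops every bitLength bound by one
lemma pass_mem : ∀ (l : List Int), (∀ x ∈ l, 1 ≤ x) → ∀ {f : Nat},
    (∀ x ∈ l, PySem.Int.bitLength x ≤ f + 2) →
    ∀ y ∈ (solutionPass l).1, 1 ≤ y ∧ PySem.Int.bitLength y ≤ f + 1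
  | [], _, _, _, y, hy => by simp [solutionPass] at hy
  | x :: xs, hpos, f, hb, y, hy => by
    have hx := hpos x (by simp)
    have hbx := hb x (by simp)
    have ih := pass_mem xs (fun z hz => hpos z (by simp [hz]))
      (f := f) (fun z hz => hb z (by simp [hz]))
    simp only [solutionPass] at hy
    by_cases h1 : x = 1
    · rw [if_neg (by simp [h1])] at hy
      simp only [List.mem_cons] at hy
      rcases hy with hy | hy
      · subst hy; exact ⟨by omega, by rw [h1, pvBitLenOne]; omega⟩
      · exact ih y hy
    · rw [if_pos h1] at hy
      simp only [List.mem_cons] at hy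
      rcases hy with hy | hy
      · subst hy
        have h2 : 2 ≤ x := by omega
        refine ⟨pvHalfPos h2, ?_⟩
        rw [pvBitLenHalf h2]
        have : 1 ≤ PySem.Int.bitLength x := by
          have := PySem.Int.bitLength_of_pos (n := x) (by omega); omega
        omega
      · exact ih y hy

-- count + remaining work after a pass = work before the pass
lemma pass_sum : ∀ (l : List Int), (∀ x ∈ l, 1 ≤ x) →
    (solutionPass l).2 + ((solutionPass l).1.map (fun n => (PySem.Int.bitLength n : Int) - 1)).sum
      = (l.map (fun n => (PySem.Int.bitLength n : Int) - 1)).sum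
  | [], _ => by simp [solutionPass]
  | x :: xs, hpos => by
    have hx := hpos x (by simp)
    have ih := pass_sum xs (fun z hz => hpos z (by simp [hz]))
    simp only [solutionPass]
    by_cases h1 : x = 1
    · rw [if_neg (by simp [h1])]
      simp only [List.map_cons, List.sum_cons, h1, pvBitLenOne]
      omega
    · rw [if_pos h1]
      simp only [List.map_cons, List.sum_cons]
      have h2 : 2 ≤ x := by omega
      have hbl := pvBitLenHalf h2
      have hb1 : 1 ≤ PySem.Int.bitLength x := by
        have := PySem.Int.bitLength_of_pos (n := x) (by omega); omega
      have : (PySem.Int.bitLength (PySem.Int.floordiv x 2) : Int)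
            = (PySem.Int.bitLength x : Int) - 1 := by
        rw [hbl]; omega
      omega

lemma all_one_sum {l : List Int} (h : ∀ x ∈ l, x = 1) :
    (l.map (fun n => (PySem.Int.bitLength n : Int) - 1)).sum = 0 := by
  induction l with
  | nil => simp
  | cons x xs ih =>
    have hx := h x (by simp)
    simp only [List.map_cons, List.sum_cons, hx, pvBitLenOne,
      ih (fun z hz => h z (by simp [hz]))]
    omega

lemma loop_eq : ∀ (f : Nat) (l : List Int) (ans : Int),
    (∀ x ∈ l, 1 ≤ x) → (∀ x ∈ l, PySem.Int.bitLength x ≤ f + 1) →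
    solutionLoop f l ans = ans + (l.map (fun n => (PySem.Int.bitLength n : Int) - 1)).sum
  | 0, l, ans, hpos, hb => by
    have hall : ∀ x ∈ l, x = 1 := fun x hx =>
      eq_one_of_bitLength_le_one (hpos x hx) (by have := hb x hx; omega)
    rw [solutionLoop, all_one_sum hall]; omega
  | f+1, l, ans, hpos, hb => by
    rw [solutionLoop]
    by_cases hc : l.count 1 = l.length
    · have hall : ∀ x ∈ l, x = 1 := by
        have := (List.count_eq_length (a := 1) (l := l)).1 hc
        exact fun x hx => (this x hx).symm
      rw [if_pos hc, all_one_sum hall]; omega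
    · rw [if_neg hc]
      have hmem := pass_mem l hpos (f := f) (fun x hx => by have := hb x hx; omega)
      have := loop_eq f (solutionPass l).1 (ans + (solutionPass l).2)
        (fun y hy => (hmem y hy).1) (fun y hy => by have := (hmem y hy).2; omega)
      rw [this]
      have := pass_sum l hpos
      omega

lemma bitLength_le_32 {x : Int} (hx : 1 ≤ x) (hd : x ≤ 2147483648) :
    PySem.Int.bitLength x ≤ 32 := by
  by_contra h
  have hne : x ≠ 0 := by omega
  have hle := PySem.Int.two_pow_bitLength_le x hne
  have h32 : (2:Nat) ^ 32 ≤ 2 ^ (PySem.Int.bitLength x - 1) :=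
    Nat.pow_le_pow_right (by omega) (by omega)
  have hub : x.natAbs ≤ 2 ^ 31 := by
    have : x.natAbs ≤ 2147483648 := by omega
    simpa using this
  have : (2:Nat) ^ 32 ≤ 2 ^ 31 := le_trans h32 (le_trans hle hub)
  norm_num at this

-- ===== VERDICT (by name: the statement is the Claim_ definition above) =====
theorem solution_spec : Claim_equal_solution := by
  intro l hdom hpre
  unfold Spec_solution solution solution_alt
  have hb : ∀ x ∈ l, PySem.Int.bitLength x ≤ 64 + 1 := by
    intro x hx
    have hd : pvDomInt x = true := by
      have := hdom
      unfold Dom_solution at this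
      rw [List.all_eq_true] at this
      exact this x hx
    unfold pvDomInt at hd
    simp only [decide_eq_true_eq] at hd
    have := bitLength_le_32 (hpre x hx) hd.2
    omega
  have := loop_eq 64 l 0 hpre hb
  omega
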